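-- pv_equiv track=rewrite | github.com/davityourway/Possible-States | montecarlostates.py | find_states_per_turn
-- ===== SOURCE A (Python) =====
-- from math import factorial
--
-- def find_states_per_turn(positions: int):
--     """
--     determines how many possible states (of all kinds, even illegal) can come from each turn
--     using the forumla from https://psyarxiv.com/rhq5j pg.19 of Supplemental Material
--
--     :param positions: total number of positions that can be filled
--     :return: a list of the total number of states (terminal, non-terminal, and illegal) for each turn
--     """
--     totals = {x: 0 for x in range(positions+1)}
--     totals[0] = 1
--     for turn in range(1, positions+1):
--         m = turn//2
--         n = turn - m
--         totals[turn] = factorial(positions) // (factorial(n) * factorial(m) * factorial(positions - turn))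
--     return totals
-- ===== SOURCE B (Python) =====
-- def find_states_per_turn(positions: int):
--     """
--     Same results as A, but via the multiplicative recurrence
--     totals[t] = totals[t-1] * (positions - t + 1) // d, where d is the
--     multinomial index that just incremented (n for odd t, m for even t),
--     instead of evaluating factorials at every turn.
--     """
--     totals = {0: 1}
--     value = 1
--     for turn in range(1, positions + 1):
--         d = turn - turn // 2 if turn % 2 == 1 else turn // 2
--         value = value * (positions - turn + 1) // d
--         totals[turn] = value
--     return totals
-- ===== Notes on version B (the rewrite author's own statement) =====
-- stated objective: faster
-- what changed: Replaces the per-turn evaluation of four factorials (and two bignum multiplications plus a bignum division by a huge factorial product) with a single running value updated by the exact multiplicative recurrence value = value * (positions - turn + 1) // d, where d is the multinomial index that just incremented (n for odd turns, m for even turns), and drops the dict pre-initialization pass.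
import Mathlib
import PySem

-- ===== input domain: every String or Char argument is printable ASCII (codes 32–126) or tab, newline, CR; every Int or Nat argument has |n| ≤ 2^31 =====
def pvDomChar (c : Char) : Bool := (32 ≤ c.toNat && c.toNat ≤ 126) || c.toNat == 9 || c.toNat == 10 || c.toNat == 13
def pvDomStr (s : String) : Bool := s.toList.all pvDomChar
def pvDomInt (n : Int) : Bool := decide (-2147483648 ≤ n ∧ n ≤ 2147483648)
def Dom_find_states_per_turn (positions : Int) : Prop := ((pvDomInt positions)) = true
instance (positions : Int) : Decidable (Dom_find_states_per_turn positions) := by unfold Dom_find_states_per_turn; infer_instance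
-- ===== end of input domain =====

-- B replaces the per-turn factorial evaluations by a single multiplicative recurrence
-- on a running value (objective: faster by a constant factor per turn).

-- ===== PORT A =====
-- math.factorial; A only applies it to nonnegative arguments, where this is exact
def pyFactorial (k : Int) : Int := (Nat.factorial k.toNat : Int)

def find_states_per_turn (positions : Int) : List (Int × Int) :=
  let totals : PySem.Dict Int Int :=
    PySem.Dict.ofList ((PySem.List.pyRange 0 (positions + 1) 1).map (fun x => (x, (0 : Int))))
  let totals := totals.insert 0 1
  let totals := (PySem.List.pyRange 1 (positions + 1) 1).foldl
    (fun d turn =>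
      let m := PySem.Int.floordiv turn 2
      let n := turn - m
      d.insert turn (PySem.Int.floordiv (pyFactorial positions)
        (pyFactorial n * pyFactorial m * pyFactorial (positions - turn)))) totals
  totals.items

-- ===== PORT B =====
def find_states_per_turn_alt (positions : Int) : List (Int × Int) :=
  let st : PySem.Dict Int Int × Int := (PySem.Dict.ofList [((0 : Int), (1 : Int))], 1)
  let r := (PySem.List.pyRange 1 (positions + 1) 1).foldl
    (fun (st : PySem.Dict Int Int × Int) turn =>
      let d := if PySem.Int.mod turn 2 == 1 then turn - PySem.Int.floordiv turn 2
               else PySem.Int.floordiv turn 2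
      let v := PySem.Int.floordiv (st.2 * (positions - turn + 1)) d
      (st.1.insert turn v, v)) st
  r.1.items

-- ===== PRECONDITION & SPEC =====
def Spec_find_states_per_turn (positions : Int) (out : List (Int × Int)) : Prop := out = find_states_per_turn_alt positions
instance (positions : Int) (out : List (Int × Int)) : Decidable (Spec_find_states_per_turn positions out) := by unfold Spec_find_states_per_turn; infer_instance

-- ===== CLAIM (what is proved, stated in full; the proofs are below) =====
def Claim_equal_find_states_per_turn : Prop := ∀ (positions : Int), Dom_find_states_per_turn positions → Spec_find_states_per_turn positions (find_states_per_turn positions)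

-- ===== LEMMAS AND PROOFS =====

-- the common closed form: the multinomial count for turn t out of p positions
def pvT (p t : Nat) : Nat := p.choose t * t.choose (t / 2)

-- the divisor B uses at turn t
def pvD (t : Nat) : Nat := if t % 2 = 1 then t - t / 2 else t / 2

lemma pvD_pos (t : Nat) (h : 1 ≤ t) : 0 < pvD t := by
  unfold pvD; split_ifs <;> omega

-- A's factorial quotient is pvT
lemma pv_fact_div (p t : Nat) (ht : t ≤ p) :
    p.factorial / ((t - t / 2).factorial * (t / 2).factorial * (p - t).factorial) = pvT p t := by
  have h1 := Nat.choose_mul_factorial_mul_factorial (Nat.div_le_self t 2)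
  have h2 := Nat.choose_mul_factorial_mul_factorial ht
  have hfac : p.factorial
      = pvT p t * ((t - t / 2).factorial * (t / 2).factorial * (p - t).factorial) := by
    rw [← h2, ← h1]; unfold pvT; ring
  rw [hfac, Nat.mul_div_cancel]
  positivity

-- the exact multiplicative recurrence
lemma pv_rec (p k : Nat) : pvT p k * (p - k) = pvT p (k + 1) * pvD (k + 1) := by
  rcases Nat.even_or_odd k with ⟨s, rfl⟩ | ⟨s, rfl⟩
  · have h2 : (s + s) / 2 = s := by omega
    have h2' : (s + s + 1) / 2 = s := by omega
    have hd : pvD (s + s + 1) = s + 1 := by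
      unfold pvD; rw [if_pos (by omega)]; omega
    have hA1 := Nat.choose_succ_right_eq p (s + s)
    have hA2 := Nat.add_one_mul_choose_eq (s + s) s
    have hA3 : (s + s + 1).choose (s + 1) = (s + s + 1).choose s := by
      have := Nat.choose_symm (n := s + s + 1) (k := s + 1) (by omega)
      simpa [show s + s + 1 - (s + 1) = s by omega] using this.symm
    unfold pvT
    rw [h2, h2', hd]
    calc p.choose (s+s) * (s+s).choose s * (p - (s+s))
        = (s+s).choose s * (p.choose (s+s) * (p - (s+s))) := by ring
      _ = (s+s).choose s * (p.choose (s+s+1) * (s+s+1)) := by rw [← hA1]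
      _ = p.choose (s+s+1) * ((s+s+1) * (s+s).choose s) := by ring
      _ = p.choose (s+s+1) * ((s+s+1).choose (s+1) * (s+1)) := by rw [hA2]
      _ = p.choose (s+s+1) * (s+s+1).choose s * (s+1) := by rw [hA3]; ring
  · have h2 : (2 * s + 1) / 2 = s := by omega
    have h2' : (2 * s + 1 + 1) / 2 = s + 1 := by omega
    have hd : pvD (2 * s + 1 + 1) = s + 1 := by
      unfold pvD; rw [if_neg (by omega)]; omega
    have hA1 := Nat.choose_succ_right_eq p (2 * s + 1)
    have hA2 := Nat.add_one_mul_choose_eq (2 * s + 1) s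
    unfold pvT
    rw [h2, h2', hd]
    calc p.choose (2*s+1) * (2*s+1).choose s * (p - (2*s+1))
        = (2*s+1).choose s * (p.choose (2*s+1) * (p - (2*s+1))) := by ring
      _ = (2*s+1).choose s * (p.choose (2*s+1+1) * (2*s+1+1)) := by rw [← hA1]
      _ = p.choose (2*s+1+1) * ((2*s+1+1) * (2*s+1).choose s) := by ring
      _ = p.choose (2*s+1+1) * ((2*s+1+1).choose (s+1) * (s+1)) := by rw [hA2]
      _ = p.choose (2*s+1+1) * (2*s+1+1).choose (s+1) * (s+1) := by ring

lemma pv_rec_div (p k : Nat) : pvT p k * (p - k) / pvD (k + 1) = pvT p (k + 1) := by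
  rw [pv_rec, Nat.mul_div_cancel _ (pvD_pos _ (by omega))]

lemma pv_range0 (p : Nat) :
    PySem.List.pyRange 0 ((p : Int) + 1) 1 = (List.range (p + 1)).map (fun k : Nat => (k : Int)) := by
  have := PySem.List.pyRange_zero_nat (p + 1)
  push_cast at this
  exact this

lemma pv_init_items (p : Nat) :
    ((PySem.Dict.ofList ((PySem.List.pyRange 0 ((p : Int) + 1) 1).map (fun x => (x, (0 : Int))))).insert 0 1).items
    = ((0 : Int), (1 : Int)) :: (List.range' 1 p).map (fun t : Nat => ((t : Int), (0 : Int))) := by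
  rw [pv_range0]
  have hof : (PySem.Dict.ofList ((List.range (p + 1)).map (fun k : Nat => ((k : Int), (0 : Int))) )).items
      = (List.range (p + 1)).map (fun k : Nat => ((k : Int), (0 : Int))) := by
    have h := PySem.Dict.items_foldl_insert_fresh
      (l := (List.range (p + 1)).map (fun k : Nat => ((k : Int), (0 : Int))))
      (k := Prod.fst) (v := Prod.snd) (d := PySem.Dict.empty)
      (by intro a _; exact PySem.Dict.contains_empty _)
      (by
        simp only [List.map_map]
        have : ((fun x : Int × Int => x.1) ∘ fun k : Nat => ((k : Int), (0 : Int))) = fun k : Nat => (k : Int) := rfl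
        rw [this]
        exact (List.nodup_range (n := p + 1)).map (fun a b h => by exact_mod_cast h))
    simpa [PySem.Dict.ofList, PySem.Dict.update] using h
  have hmk : PySem.Dict.ofList ((List.range (p + 1)).map (fun k : Nat => ((k : Int), (0 : Int))))
      = PySem.Dict.mk ((List.range (p + 1)).map (fun k : Nat => ((k : Int), (0 : Int)))) :=
    PySem.Dict.ext hof
  rw [show (List.map (fun x : Int => (x, (0:Int))) (List.map (fun k : Nat => (k : Int)) (List.range (p+1))))
      = (List.range (p + 1)).map (fun k : Nat => ((k : Int), (0 : Int))) by simp [List.map_map]]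
  rw [hmk]
  have hcontains : (PySem.Dict.mk ((List.range (p + 1)).map (fun k : Nat => ((k : Int), (0 : Int))))).contains 0 = true := by
    rw [PySem.Dict.contains_mk]
    simp [List.any_eq_true]
  rw [PySem.Dict.items_insert_of_contains _ _ hcontains]
  have hsplit : List.range (p + 1) = 0 :: List.range' 1 p := by
    simp [List.range_eq_range', List.range'_succ]
  rw [hsplit]
  simp only [List.map_cons, Nat.cast_zero, List.map_map]
  have hcongr : ∀ t ∈ List.range' 1 p,
      ((fun q : Int × Int => if (q.1 == (0:Int)) = true then ((0:Int), (1:Int)) else q) ∘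
        (fun k : Nat => ((k : Int), (0 : Int)))) t = ((t : Int), (0 : Int)) := by
    intro t ht
    have h1 : (1 : Nat) ≤ t := (List.mem_range'_1.mp ht).1
    have hne : ((t : Int) == 0) = false := by simp; omega
    simp [Function.comp, hne]
  rw [List.map_congr_left hcongr]
  simp

-- A's loop only inserts at keys already present: each step overwrites entry `turn`
lemma pv_foldA (p : Nat) (f : Int → Int) :
    ∀ k, k ≤ p →
    ((PySem.List.pyRange 1 ((k : Int) + 1) 1).foldl (fun d turn => d.insert turn (f turn))
        (PySem.Dict.mk (((0 : Int), (1 : Int)) :: (List.range' 1 p).map (fun t : Nat => ((t : Int), (0 : Int)))))).items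
    = (((0 : Int), (1 : Int)) :: (List.range' 1 k).map (fun t : Nat => ((t : Int), f t)))
      ++ (List.range' (k + 1) (p - k)).map (fun t : Nat => ((t : Int), (0 : Int))) := by
  intro k
  induction k with
  | zero =>
    intro _
    rw [show ((0 : Nat) : Int) + 1 = 1 by norm_num, PySem.List.pyRange_one_eq_nil le_rfl]
    simp
  | succ k ih =>
    intro hk
    have hk' : k ≤ p := by omega
    have hsplit : PySem.List.pyRange 1 (((k + 1 : Nat) : Int) + 1) 1
        = PySem.List.pyRange 1 ((k : Int) + 1) 1 ++ [(k : Int) + 1] := by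
      have h := PySem.List.pyRange_one_succ_right (a := 1) (b := (k : Int) + 1) (by omega)
      rw [show (((k + 1 : Nat) : Int) + 1) = ((k : Int) + 1) + 1 by push_cast; ring]
      exact h
    rw [hsplit, List.foldl_append]
    set D := (PySem.List.pyRange 1 ((k : Int) + 1) 1).foldl (fun d turn => d.insert turn (f turn))
        (PySem.Dict.mk (((0 : Int), (1 : Int)) :: (List.range' 1 p).map (fun t : Nat => ((t : Int), (0 : Int))))) with hD
    have hDitems := ih hk'
    have hDmk : D = PySem.Dict.mk ((((0 : Int), (1 : Int)) :: (List.range' 1 k).map (fun t : Nat => ((t : Int), f t)))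
        ++ (List.range' (k + 1) (p - k)).map (fun t : Nat => ((t : Int), (0 : Int)))) := PySem.Dict.ext hDitems
    have hsuffix : List.range' (k + 1) (p - k) = (k + 1) :: List.range' (k + 2) (p - k - 1) := by
      obtain ⟨w, hw⟩ : ∃ w, p - k = w + 1 := ⟨p - k - 1, by omega⟩
      rw [hw, List.range'_succ]
      refine congrArg (List.cons (k + 1)) ?_
      congr 1
    simp only [List.foldl_cons, List.foldl_nil]
    rw [hDmk]
    have hcontains : (PySem.Dict.mk ((((0 : Int), (1 : Int)) :: (List.range' 1 k).map (fun t : Nat => ((t : Int), f t)))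
        ++ (List.range' (k + 1) (p - k)).map (fun t : Nat => ((t : Int), (0 : Int))))).contains ((k : Int) + 1) = true := by
      rw [PySem.Dict.contains_mk, hsuffix]
      simp
    rw [PySem.Dict.items_insert_of_contains _ _ hcontains]
    rw [hsuffix]
    simp only [List.map_cons, List.map_append, List.map_map, List.cons_append]
    have hne0 : (((0 : Int), (1 : Int)).1 == (k : Int) + 1) = false := by simp; omega
    have hpre : List.map ((fun q : Int × Int => if (q.1 == (k : Int) + 1) = true then ((k : Int) + 1, f ((k : Int) + 1)) else q) ∘
        (fun t : Nat => ((t : Int), f t))) (List.range' 1 k)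
        = List.map (fun t : Nat => ((t : Int), f t)) (List.range' 1 k) := by
      apply List.map_congr_left
      intro t ht
      have h1 := List.mem_range'_1.mp ht
      have hne : ((t : Int) == (k : Int) + 1) = false := by simp; omega
      simp [Function.comp, hne]
    have hpost : List.map ((fun q : Int × Int => if (q.1 == (k : Int) + 1) = true then ((k : Int) + 1, f ((k : Int) + 1)) else q) ∘
        (fun t : Nat => ((t : Int), (0 : Int)))) (List.range' (k + 2) (p - k - 1))
        = List.map (fun t : Nat => ((t : Int), (0 : Int))) (List.range' (k + 2) (p - k - 1)) := by
      apply List.map_congr_left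
      intro t ht
      have h1 := List.mem_range'_1.mp ht
      have hne : ((t : Int) == (k : Int) + 1) = false := by simp; omega
      simp [Function.comp, hne]
    rw [hpre, hpost]
    have hrange : List.range' 1 (k + 1) = List.range' 1 k ++ [k + 1] := by
      have h := List.range'_concat (s := 1) (n := k) (step := 1)
      rw [show 1 + 1 * k = k + 1 by omega] at h
      exact h
    rw [hrange]
    simp [hne0, List.append_assoc]
    rw [show p - k - 1 = p - (k + 1) by omega, show k + 2 = k + 1 + 1 by omega]

-- B's divisor expression is pvD
lemma pv_dval (k : Nat) :
    (if (PySem.Int.mod ((k : Int) + 1) 2 == 1) = true then ((k : Int) + 1) - PySem.Int.floordiv ((k : Int) + 1) 2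
     else PySem.Int.floordiv ((k : Int) + 1) 2) = ((pvD (k + 1) : Nat) : Int) := by
  have hc : ((k : Int) + 1) = (((k + 1 : Nat)) : Int) := by push_cast; ring
  have hm : PySem.Int.mod (((k + 1 : Nat)) : Int) 2 = (((k + 1) % 2 : Nat) : Int) := by
    exact_mod_cast PySem.Int.mod_natCast (k + 1) 2
  have hf : PySem.Int.floordiv (((k + 1 : Nat)) : Int) 2 = (((k + 1) / 2 : Nat) : Int) := by
    exact_mod_cast PySem.Int.floordiv_natCast (k + 1) 2
  rw [hc, hm, hf]
  unfold pvD
  rcases Nat.mod_two_eq_zero_or_one (k + 1) with h | h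
  · rw [h]
    simp
  · rw [h]
    simp [Nat.cast_sub (Nat.div_le_self (k + 1) 2)]

-- B's running value follows the recurrence
lemma pv_vval (p k : Nat) (hk : k + 1 ≤ p) :
    PySem.Int.floordiv (((pvT p k : Nat) : Int) * ((p : Int) - ((k : Int) + 1) + 1)) (((pvD (k + 1) : Nat)) : Int)
    = ((pvT p (k + 1) : Nat) : Int) := by
  have h1 : ((p : Int) - ((k : Int) + 1) + 1) = ((p - k : Nat) : Int) := by
    rw [Nat.cast_sub (by omega : k ≤ p)]; ring
  rw [h1, show (((pvT p k : Nat) : Int) * ((p - k : Nat) : Int)) = (((pvT p k * (p - k) : Nat)) : Int) by push_cast; ring]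
  rw [PySem.Int.floordiv_natCast]
  exact_mod_cast congrArg (fun n : Nat => (n : Int)) (pv_rec_div p k)

lemma pv_foldB (p : Nat) : ∀ k, k ≤ p →
    ((PySem.List.pyRange 1 ((k : Int) + 1) 1).foldl
      (fun (st : PySem.Dict Int Int × Int) turn =>
        let d := if PySem.Int.mod turn 2 == 1 then turn - PySem.Int.floordiv turn 2
                 else PySem.Int.floordiv turn 2
        let v := PySem.Int.floordiv (st.2 * ((p : Int) - turn + 1)) d
        (st.1.insert turn v, v))
      (PySem.Dict.ofList [((0 : Int), (1 : Int))], 1))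
    = (PySem.Dict.mk (((0 : Int), (1 : Int)) :: (List.range' 1 k).map (fun t : Nat => ((t : Int), ((pvT p t : Nat) : Int)))),
       ((pvT p k : Nat) : Int)) := by
  intro k
  induction k with
  | zero =>
    intro _
    rw [show ((0 : Nat) : Int) + 1 = 1 by norm_num, PySem.List.pyRange_one_eq_nil le_rfl]
    simp only [List.foldl_nil, List.range'_zero, List.map_nil]
    have h0 : pvT p 0 = 1 := by simp [pvT]
    rw [h0]
    rfl
  | succ k ih =>
    intro hk
    have hk' : k ≤ p := by omega
    have hsplit : PySem.List.pyRange 1 (((k + 1 : Nat) : Int) + 1) 1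
        = PySem.List.pyRange 1 ((k : Int) + 1) 1 ++ [(k : Int) + 1] := by
      have h := PySem.List.pyRange_one_succ_right (a := 1) (b := (k : Int) + 1) (by omega)
      rw [show (((k + 1 : Nat) : Int) + 1) = ((k : Int) + 1) + 1 by push_cast; ring]
      exact h
    rw [hsplit, List.foldl_append, ih hk']
    simp only [List.foldl_cons, List.foldl_nil]
    rw [pv_dval k, pv_vval p k hk]
    have hrange : List.range' 1 (k + 1) = List.range' 1 k ++ [k + 1] := by
      have h := List.range'_concat (s := 1) (n := k) (step := 1)
      rw [show 1 + 1 * k = k + 1 by omega] at h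
      exact h
    have hnc : (PySem.Dict.mk (((0 : Int), (1 : Int)) :: (List.range' 1 k).map (fun t : Nat => ((t : Int), ((pvT p t : Nat) : Int))))).contains ((k : Int) + 1) = false := by
      rw [PySem.Dict.contains_mk]
      simp only [List.any_cons, List.any_map, Bool.or_eq_false_iff]
      constructor
      · simp; omega
      · rw [List.any_eq_false]
        intro t ht
        have h1 := List.mem_range'_1.mp ht
        simp [Function.comp]
        omega
    simp only [Prod.mk.injEq]
    constructor
    · apply PySem.Dict.ext
      rw [PySem.Dict.items_insert_of_not_contains _ _ hnc]
      rw [hrange]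
      simp
    · trivial

-- A's factorial quotient at turn t
lemma pv_Aval (p t : Nat) (ht : t ≤ p) :
    PySem.Int.floordiv (pyFactorial (p : Int))
      (pyFactorial ((t : Int) - PySem.Int.floordiv (t : Int) 2) * pyFactorial (PySem.Int.floordiv (t : Int) 2)
        * pyFactorial ((p : Int) - (t : Int)))
    = ((pvT p t : Nat) : Int) := by
  have hf2 : PySem.Int.floordiv (t : Int) 2 = ((t / 2 : Nat) : Int) := by
    exact_mod_cast PySem.Int.floordiv_natCast t 2
  rw [hf2]
  rw [show ((t : Int) - ((t / 2 : Nat) : Int)) = ((t - t / 2 : Nat) : Int) by rw [Nat.cast_sub (Nat.div_le_self _ _)]]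
  rw [show ((p : Int) - (t : Int)) = ((p - t : Nat) : Int) by rw [Nat.cast_sub ht]]
  have hfac : ∀ n : Nat, pyFactorial ((n : Nat) : Int) = ((n.factorial : Nat) : Int) := by
    intro n; simp [pyFactorial]
  rw [hfac, hfac, hfac, hfac]
  rw [show ((((t - t / 2).factorial : Nat) : Int) * (((t / 2).factorial : Nat) : Int) * (((p - t).factorial : Nat) : Int))
      = ((((t - t / 2).factorial * (t / 2).factorial * (p - t).factorial : Nat)) : Int) by push_cast; ring]
  rw [PySem.Int.floordiv_natCast]
  exact_mod_cast congrArg (fun n : Nat => (n : Int)) (pv_fact_div p t ht)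

theorem find_states_per_turn_spec : Claim_equal_find_states_per_turn := by
  intro positions _
  unfold Spec_find_states_per_turn
  by_cases hpos : 0 ≤ positions
  case neg =>
    unfold find_states_per_turn find_states_per_turn_alt
    rw [PySem.List.pyRange_one_eq_nil (by omega : positions + 1 ≤ 0),
        PySem.List.pyRange_one_eq_nil (by omega : positions + 1 ≤ 1)]
    rfl
  case pos =>
    obtain ⟨p, rfl⟩ := Int.eq_ofNat_of_zero_le hpos
    simp only [find_states_per_turn, find_states_per_turn_alt]
    rw [PySem.Dict.ext (pv_init_items p)]
    rw [pv_foldA p (fun turn => PySem.Int.floordiv (pyFactorial ((p : Nat) : Int))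
      (pyFactorial (turn - PySem.Int.floordiv turn 2) * pyFactorial (PySem.Int.floordiv turn 2)
        * pyFactorial (((p : Nat) : Int) - turn))) p le_rfl]
    rw [pv_foldB p p le_rfl]
    rw [Nat.sub_self]
    simp only [List.range'_zero, List.map_nil, List.append_nil]
    apply congrArg (List.cons ((0 : Int), (1 : Int)))
    apply List.map_congr_left
    intro t ht
    have h1 := List.mem_range'_1.mp ht
    have := pv_Aval p t (by omega)
    rw [this]
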